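-- pv_equiv track=rewrite | github.com/EBellache/neural_algebraic_geometry | src/spherical_harmonics/platonic_harmonics.py | get_allowed_harmonics
-- ===== SOURCE A (Python) =====
-- from typing import NamedTuple, Dict, Tuple, List
--
-- def get_allowed_harmonics(solid_name: str, max_l: int) -> List[Tuple[int, int]]:
--     """Get (l, m) pairs allowed by solid's symmetry group.
--
--     Args:
--         solid_name: Name of Platonic solid
--         max_l: Maximum l value
--
--     Returns:
--         List of allowed (l, m) tuples
--     """
--     allowed = []
--
--     if solid_name == "tetrahedron":
--         # Tetrahedral symmetry (Td): A4 group
--         # Allows l = 0, 3, 4, 6, ...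
--         for l in range(max_l + 1):
--             if l == 0 or l == 3 or l == 4 or l == 6:
--                 for m in range(-l, l + 1):
--                     if is_tetrahedral_allowed(l, m):
--                         allowed.append((l, m))
--
--     elif solid_name == "cube" or solid_name == "octahedron":
--         # Octahedral symmetry (Oh): S4 group
--         # Allows l = 0, 4, 6, ...
--         for l in range(max_l + 1):
--             if l % 2 == 0 and (l == 0 or l == 4 or l == 6):
--                 for m in range(-l, l + 1):
--                     if m % 4 == 0:
--                         allowed.append((l, m))
--
--     elif solid_name == "icosahedron" or solid_name == "dodecahedron":
--         # Icosahedral symmetry (Ih): A5 group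
--         # Allows l = 0, 6, 10, 12, ...
--         for l in range(max_l + 1):
--             if l == 0 or l == 6:
--                 for m in range(-l, l + 1):
--                     if is_icosahedral_allowed(l, m):
--                         allowed.append((l, m))
--     else:
--         # Default: all harmonics
--         for l in range(max_l + 1):
--             for m in range(-l, l + 1):
--                 allowed.append((l, m))
--
--     return allowed
--
-- def is_tetrahedral_allowed(l: int, m: int) -> bool:
--     """Check if (l, m) is allowed by tetrahedral symmetry."""
--     # Simplified - full implementation would check character tables
--     if l == 0:
--         return m == 0
--     elif l == 3:
--         return abs(m) == 0 or abs(m) == 3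
--     elif l == 4:
--         return m % 4 == 0
--     elif l == 6:
--         return abs(m) == 0 or abs(m) == 6
--     return False
--
-- def is_icosahedral_allowed(l: int, m: int) -> bool:
--     """Check if (l, m) is allowed by icosahedral symmetry."""
--     # Simplified - full implementation would use group theory
--     if l == 0:
--         return m == 0
--     elif l == 6:
--         return m % 5 == 0 or abs(m) == 6
--     return False
-- ===== SOURCE B (Python) =====
-- from typing import List, Tuple
--
-- # Precomputed symmetry-allowed (l, m) tables per Platonic solid (ascending l, then m).
-- _TABLES = {
--     "tetrahedron": [(0, 0), (3, -3), (3, 0), (3, 3), (4, -4), (4, 0), (4, 4),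
--                     (6, -6), (6, 0), (6, 6)],
--     "cube": [(0, 0), (4, -4), (4, 0), (4, 4), (6, -4), (6, 0), (6, 4)],
--     "octahedron": [(0, 0), (4, -4), (4, 0), (4, 4), (6, -4), (6, 0), (6, 4)],
--     "icosahedron": [(0, 0), (6, -6), (6, -5), (6, 0), (6, 5), (6, 6)],
--     "dodecahedron": [(0, 0), (6, -6), (6, -5), (6, 0), (6, 5), (6, 6)],
-- }
--
-- def get_allowed_harmonics(solid_name: str, max_l: int) -> List[Tuple[int, int]]:
--     table = _TABLES.get(solid_name)
--     if table is not None: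
--         return [(l, m) for (l, m) in table if l <= max_l]
--     return [(l, m) for l in range(max_l + 1) for m in range(-l, l + 1)]
-- ===== Notes on version B (the rewrite author's own statement) =====
-- stated objective: simpler
-- what changed: Replaced the per-solid scan of range(max_l+1) with inner -l..l loops and character-table predicates by a precomputed dispatch dict mapping each solid to its explicit finite (l,m) table, filtered by l <= max_l; only the default branch keeps an enumeration, as a single comprehension.
import Mathlib
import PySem

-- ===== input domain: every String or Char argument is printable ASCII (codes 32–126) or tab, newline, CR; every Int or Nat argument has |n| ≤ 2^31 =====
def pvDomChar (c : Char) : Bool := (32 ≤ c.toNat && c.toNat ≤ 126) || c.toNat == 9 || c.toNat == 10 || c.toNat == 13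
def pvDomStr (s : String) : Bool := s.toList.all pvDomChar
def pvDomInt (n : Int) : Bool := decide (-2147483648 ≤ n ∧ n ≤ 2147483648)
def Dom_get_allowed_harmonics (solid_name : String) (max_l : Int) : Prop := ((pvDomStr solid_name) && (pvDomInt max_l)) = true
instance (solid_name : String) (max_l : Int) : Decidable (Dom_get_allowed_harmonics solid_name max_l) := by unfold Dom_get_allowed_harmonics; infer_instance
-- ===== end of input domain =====

-- B replaces A's range scans + symmetry predicates by a precomputed per-solid table of (l,m)
-- pairs filtered by l ≤ max_l (objective: simpler). Return values proved equal on all inputs.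

-- ===== PORT A =====
def is_tetrahedral_allowed (l m : Int) : Bool :=
  if l = 0 then m == 0
  else if l = 3 then m.natAbs == 0 || m.natAbs == 3
  else if l = 4 then PySem.Int.mod m 4 == 0
  else if l = 6 then m.natAbs == 0 || m.natAbs == 6
  else false

def is_icosahedral_allowed (l m : Int) : Bool :=
  if l = 0 then m == 0
  else if l = 6 then PySem.Int.mod m 5 == 0 || m.natAbs == 6
  else false

def get_allowed_harmonics (solid_name : String) (max_l : Int) : List (Int × Int) :=
  if solid_name = "tetrahedron" then
    (PySem.List.pyRange 0 (max_l + 1) 1).foldl (fun acc l =>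
      if l = 0 ∨ l = 3 ∨ l = 4 ∨ l = 6 then
        (PySem.List.pyRange (-l) (l + 1) 1).foldl (fun acc m =>
          if is_tetrahedral_allowed l m then acc ++ [(l, m)] else acc) acc
      else acc) []
  else if solid_name = "cube" ∨ solid_name = "octahedron" then
    (PySem.List.pyRange 0 (max_l + 1) 1).foldl (fun acc l =>
      if PySem.Int.mod l 2 = 0 ∧ (l = 0 ∨ l = 4 ∨ l = 6) then
        (PySem.List.pyRange (-l) (l + 1) 1).foldl (fun acc m =>
          if PySem.Int.mod m 4 = 0 then acc ++ [(l, m)] else acc) acc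
      else acc) []
  else if solid_name = "icosahedron" ∨ solid_name = "dodecahedron" then
    (PySem.List.pyRange 0 (max_l + 1) 1).foldl (fun acc l =>
      if l = 0 ∨ l = 6 then
        (PySem.List.pyRange (-l) (l + 1) 1).foldl (fun acc m =>
          if is_icosahedral_allowed l m then acc ++ [(l, m)] else acc) acc
      else acc) []
  else
    (PySem.List.pyRange 0 (max_l + 1) 1).foldl (fun acc l =>
      (PySem.List.pyRange (-l) (l + 1) 1).foldl (fun acc m =>
        acc ++ [(l, m)]) acc) []

-- ===== PORT B =====
def pvTetTable : List (Int × Int) :=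
  [(0, 0), (3, -3), (3, 0), (3, 3), (4, -4), (4, 0), (4, 4), (6, -6), (6, 0), (6, 6)]
def pvOctTable : List (Int × Int) :=
  [(0, 0), (4, -4), (4, 0), (4, 4), (6, -4), (6, 0), (6, 4)]
def pvIcoTable : List (Int × Int) :=
  [(0, 0), (6, -6), (6, -5), (6, 0), (6, 5), (6, 6)]

def pvTables : PySem.Dict String (List (Int × Int)) :=
  (((((PySem.Dict.empty.insert "tetrahedron" pvTetTable).insert "cube" pvOctTable).insert
      "octahedron" pvOctTable).insert "icosahedron" pvIcoTable).insert "dodecahedron" pvIcoTable)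

def get_allowed_harmonics_alt (solid_name : String) (max_l : Int) : List (Int × Int) :=
  match pvTables.get? solid_name with
  | some table => table.filter (fun p => p.1 ≤ max_l)
  | none =>
      (PySem.List.pyRange 0 (max_l + 1) 1).flatMap (fun l =>
        (PySem.List.pyRange (-l) (l + 1) 1).map (fun m => (l, m)))

-- ===== PRECONDITION & SPEC =====
def Spec_get_allowed_harmonics (solid_name : String) (max_l : Int) (out : List (Int × Int)) : Prop := out = get_allowed_harmonics_alt solid_name max_l
instance (solid_name : String) (max_l : Int) (out : List (Int × Int)) : Decidable (Spec_get_allowed_harmonics solid_name max_l out) := by unfold Spec_get_allowed_harmonics; infer_instance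

-- ===== CLAIM (what is proved, stated in full; the proofs are below) =====
def Claim_equal_get_allowed_harmonics : Prop := ∀ (solid_name : String) (max_l : Int), Dom_get_allowed_harmonics solid_name max_l → Spec_get_allowed_harmonics solid_name max_l (get_allowed_harmonics solid_name max_l)

-- ===== LEMMAS AND PROOFS =====

lemma pvFoldlSkip {α β : Type} (step : β → α → β) (xs : List α) (acc : β)
    (h : ∀ x ∈ xs, ∀ a, step a x = a) : xs.foldl step acc = acc := by
  induction xs generalizing acc with
  | nil => rfl
  | cons x xs ih =>
      simp only [List.foldl_cons]
      rw [h x (by simp)]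
      exact ih acc (fun y hy a => h y (by simp [hy]) a)

lemma pvTetBranch (max_l : Int) :
    (PySem.List.pyRange 0 (max_l + 1) 1).foldl (fun acc l =>
      if l = 0 ∨ l = 3 ∨ l = 4 ∨ l = 6 then
        (PySem.List.pyRange (-l) (l + 1) 1).foldl (fun acc m =>
          if is_tetrahedral_allowed l m then acc ++ [(l, m)] else acc) acc
      else acc) []
    = pvTetTable.filter (fun p => p.1 ≤ max_l) := by
  by_cases h0 : max_l < 0
  · rw [PySem.List.pyRange_one_eq_nil (by omega), eq_comm, List.foldl_nil, List.filter_eq_nil_iff]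
    intro p hp
    simp only [pvTetTable, List.mem_cons, List.not_mem_nil, or_false] at hp
    rcases hp with h|h|h|h|h|h|h|h|h|h <;> subst h <;> simp <;> omega
  · by_cases h6 : max_l ≤ 6
    · have h0' : 0 ≤ max_l := by omega
      interval_cases max_l <;> decide
    · rw [PySem.List.pyRange_one_append 0 7 (max_l + 1) (by omega) (by omega), List.foldl_append]
      have h7 : (PySem.List.pyRange 0 7 1).foldl (fun acc l =>
          if l = 0 ∨ l = 3 ∨ l = 4 ∨ l = 6 then
            (PySem.List.pyRange (-l) (l + 1) 1).foldl (fun acc m =>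
              if is_tetrahedral_allowed l m then acc ++ [(l, m)] else acc) acc
          else acc) [] = pvTetTable := by decide
      rw [h7, pvFoldlSkip _ _ _ ?_]
      · rw [eq_comm, List.filter_eq_self]
        intro p hp
        simp only [pvTetTable, List.mem_cons, List.not_mem_nil, or_false] at hp
        rcases hp with h|h|h|h|h|h|h|h|h|h <;> subst h <;> simp <;> omega
      · intro x hx a
        rw [PySem.List.mem_pyRange_one] at hx
        rw [if_neg (by omega)]

lemma pvOctBranch (max_l : Int) :
    (PySem.List.pyRange 0 (max_l + 1) 1).foldl (fun acc l =>
      if PySem.Int.mod l 2 = 0 ∧ (l = 0 ∨ l = 4 ∨ l = 6) then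
        (PySem.List.pyRange (-l) (l + 1) 1).foldl (fun acc m =>
          if PySem.Int.mod m 4 = 0 then acc ++ [(l, m)] else acc) acc
      else acc) []
    = pvOctTable.filter (fun p => p.1 ≤ max_l) := by
  by_cases h0 : max_l < 0
  · rw [PySem.List.pyRange_one_eq_nil (by omega), eq_comm, List.foldl_nil, List.filter_eq_nil_iff]
    intro p hp
    simp only [pvOctTable, List.mem_cons, List.not_mem_nil, or_false] at hp
    rcases hp with h|h|h|h|h|h|h <;> subst h <;> simp <;> omega
  · by_cases h6 : max_l ≤ 6
    · have h0' : 0 ≤ max_l := by omega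
      interval_cases max_l <;> decide
    · rw [PySem.List.pyRange_one_append 0 7 (max_l + 1) (by omega) (by omega), List.foldl_append]
      have h7 : (PySem.List.pyRange 0 7 1).foldl (fun acc l =>
          if PySem.Int.mod l 2 = 0 ∧ (l = 0 ∨ l = 4 ∨ l = 6) then
            (PySem.List.pyRange (-l) (l + 1) 1).foldl (fun acc m =>
              if PySem.Int.mod m 4 = 0 then acc ++ [(l, m)] else acc) acc
          else acc) [] = pvOctTable := by decide
      rw [h7, pvFoldlSkip _ _ _ ?_]
      · rw [eq_comm, List.filter_eq_self]
        intro p hp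
        simp only [pvOctTable, List.mem_cons, List.not_mem_nil, or_false] at hp
        rcases hp with h|h|h|h|h|h|h <;> subst h <;> simp <;> omega
      · intro x hx a
        rw [PySem.List.mem_pyRange_one] at hx
        rw [if_neg (by intro hc; omega)]

lemma pvIcoBranch (max_l : Int) :
    (PySem.List.pyRange 0 (max_l + 1) 1).foldl (fun acc l =>
      if l = 0 ∨ l = 6 then
        (PySem.List.pyRange (-l) (l + 1) 1).foldl (fun acc m =>
          if is_icosahedral_allowed l m then acc ++ [(l, m)] else acc) acc
      else acc) []
    = pvIcoTable.filter (fun p => p.1 ≤ max_l) := by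
  by_cases h0 : max_l < 0
  · rw [PySem.List.pyRange_one_eq_nil (by omega), eq_comm, List.foldl_nil, List.filter_eq_nil_iff]
    intro p hp
    simp only [pvIcoTable, List.mem_cons, List.not_mem_nil, or_false] at hp
    rcases hp with h|h|h|h|h|h <;> subst h <;> simp <;> omega
  · by_cases h6 : max_l ≤ 6
    · have h0' : 0 ≤ max_l := by omega
      interval_cases max_l <;> decide
    · rw [PySem.List.pyRange_one_append 0 7 (max_l + 1) (by omega) (by omega), List.foldl_append]
      have h7 : (PySem.List.pyRange 0 7 1).foldl (fun acc l =>
          if l = 0 ∨ l = 6 then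
            (PySem.List.pyRange (-l) (l + 1) 1).foldl (fun acc m =>
              if is_icosahedral_allowed l m then acc ++ [(l, m)] else acc) acc
          else acc) [] = pvIcoTable := by decide
      rw [h7, pvFoldlSkip _ _ _ ?_]
      · rw [eq_comm, List.filter_eq_self]
        intro p hp
        simp only [pvIcoTable, List.mem_cons, List.not_mem_nil, or_false] at hp
        rcases hp with h|h|h|h|h|h <;> subst h <;> simp <;> omega
      · intro x hx a
        rw [PySem.List.mem_pyRange_one] at hx
        rw [if_neg (by omega)]

lemma pvDefaultBranch (max_l : Int) :
    (PySem.List.pyRange 0 (max_l + 1) 1).foldl (fun acc l =>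
      (PySem.List.pyRange (-l) (l + 1) 1).foldl (fun acc m =>
        acc ++ [(l, m)]) acc) []
    = (PySem.List.pyRange 0 (max_l + 1) 1).flatMap (fun l =>
        (PySem.List.pyRange (-l) (l + 1) 1).map (fun m => (l, m))) := by
  simp only [PySem.List.foldl_append_singleton_eq_map]
  rw [PySem.List.foldl_append_eq_flatMap]
  simp

-- ===== VERDICT (by name: the statement is the Claim_ definition above) =====
theorem get_allowed_harmonics_spec : Claim_equal_get_allowed_harmonics := by
  intro solid_name max_l _
  unfold Spec_get_allowed_harmonics get_allowed_harmonics get_allowed_harmonics_alt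
  by_cases h1 : solid_name = "tetrahedron"
  · subst h1
    rw [if_pos rfl]
    have hg : pvTables.get? "tetrahedron" = some pvTetTable := by decide
    rw [hg]
    exact pvTetBranch max_l
  · rw [if_neg h1]
    by_cases h2 : solid_name = "cube" ∨ solid_name = "octahedron"
    · rw [if_pos h2]
      have hg : pvTables.get? solid_name = some pvOctTable := by
        rcases h2 with h | h <;> subst h <;> decide
      rw [hg]
      exact pvOctBranch max_l
    · rw [if_neg h2]
      by_cases h3 : solid_name = "icosahedron" ∨ solid_name = "dodecahedron"
      · rw [if_pos h3]
        have hg : pvTables.get? solid_name = some pvIcoTable := by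
          rcases h3 with h | h <;> subst h <;> decide
        rw [hg]
        exact pvIcoBranch max_l
      · rw [if_neg h3]
        push Not at h2 h3
        have hg : pvTables.get? solid_name = none := by
          simp [pvTables, PySem.Dict.get?_insert, PySem.Dict.get?_empty, h1, h2.1, h2.2, h3.1, h3.2]
        rw [hg]
        exact pvDefaultBranch max_l
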